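-- pv_equiv track=rewrite | github.com/SjoerdCor/aliexpress | tests/testedexmlgeneration.py | split_achternaam
-- ===== SOURCE A (Python) =====
-- def split_achternaam(volledige_achternaam):
--     """
--     Splitst een Nederlandse achternaam in (tussenvoegsel, achternaam).
--     Regels:
--     - Alle woorden vóór het eerste woord dat met een hoofdletter begint → tussenvoegsel
--     - Het eerste hoofdletter-woord en alles daarna → achternaam
--     """
--     if not volledige_achternaam:
--         return (None, None)
--
--     woorden = volledige_achternaam.split()
--     tussenvoegsel = []
--     achternaam = []
--     gevonden_hoofdletter = False
--
--     for w in woorden: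
--         if not gevonden_hoofdletter and w[0].isupper():
--             gevonden_hoofdletter = True
--
--         if gevonden_hoofdletter:
--             achternaam.append(w)
--         else:
--             tussenvoegsel.append(w)
--
--     return (
--         " ".join(tussenvoegsel) if tussenvoegsel else None,
--         " ".join(achternaam) if achternaam else None,
--     )
-- ===== SOURCE B (Python) =====
-- def split_achternaam(volledige_achternaam):
--     if not volledige_achternaam:
--         return (None, None)
--     woorden = volledige_achternaam.split()
--     idx = next((i for i, w in enumerate(woorden) if w[0].isupper()), None)
--     if idx is None:
--         return (" ".join(woorden) if woorden else None, None)
--     tussenvoegsel, achternaam = woorden[:idx], woorden[idx:]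
--     return (" ".join(tussenvoegsel) if tussenvoegsel else None, " ".join(achternaam))
-- ===== Notes on version B (the rewrite author's own statement) =====
-- stated objective: simpler
-- what changed: B computes the split boundary first (index of the first capitalized word) and slices the word list there, instead of A's flag-driven accumulation loop into two lists.
import Mathlib
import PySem

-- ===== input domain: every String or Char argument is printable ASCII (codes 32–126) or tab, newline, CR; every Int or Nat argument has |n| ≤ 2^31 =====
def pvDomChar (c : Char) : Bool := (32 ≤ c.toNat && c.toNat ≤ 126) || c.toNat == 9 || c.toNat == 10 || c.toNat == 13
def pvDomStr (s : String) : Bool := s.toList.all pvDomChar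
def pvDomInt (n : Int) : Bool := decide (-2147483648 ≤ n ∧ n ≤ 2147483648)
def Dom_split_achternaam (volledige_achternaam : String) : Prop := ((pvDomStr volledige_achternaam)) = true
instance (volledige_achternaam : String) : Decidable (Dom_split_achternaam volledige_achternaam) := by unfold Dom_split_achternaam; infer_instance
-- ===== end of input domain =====

-- B replaces A's flag-driven accumulation loop by computing the boundary index first and slicing; objective: simpler.

-- ===== PORT A =====
-- w[0].isupper() (words from split() are nonempty, so w[0] never raises; none ↦ false is unreachable there)
def startsUpper (w : String) : Bool := (PySem.List.pyGet? w.toList 0).any PySem.Chars.isupper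

-- one iteration of A's for-loop; state = (tussenvoegsel, achternaam, gevonden_hoofdletter)
def stepA (st : List String × List String × Bool) (w : String) : List String × List String × Bool :=
  let gevonden := if !st.2.2 && startsUpper w then true else st.2.2
  if gevonden then (st.1, st.2.1 ++ [w], gevonden) else (st.1 ++ [w], st.2.1, gevonden)

def split_achternaam (volledige_achternaam : String) : Option String × Option String :=
  if volledige_achternaam = "" then (none, none)
  else
    let woorden := PySem.Str.split₀ volledige_achternaam
    let res := woorden.foldl stepA ([], [], false)
    ((if res.1 ≠ [] then some (PySem.Str.join " " res.1) else none),
     (if res.2.1 ≠ [] then some (PySem.Str.join " " res.2.1) else none))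

-- ===== PORT B =====
def split_achternaam_alt (volledige_achternaam : String) : Option String × Option String :=
  if volledige_achternaam = "" then (none, none)
  else
    let woorden := PySem.Str.split₀ volledige_achternaam
    match woorden.findIdx? startsUpper with
    | none => ((if woorden ≠ [] then some (PySem.Str.join " " woorden) else none), none)
    | some idx =>
        let tussenvoegsel := woorden.take idx
        let achternaam := woorden.drop idx
        ((if tussenvoegsel ≠ [] then some (PySem.Str.join " " tussenvoegsel) else none),
         some (PySem.Str.join " " achternaam))

-- ===== PRECONDITION & SPEC =====
def Spec_split_achternaam (volledige_achternaam : String) (out : Option String × Option String) : Prop := out = split_achternaam_alt volledige_achternaam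
instance (volledige_achternaam : String) (out : Option String × Option String) : Decidable (Spec_split_achternaam volledige_achternaam out) := by unfold Spec_split_achternaam; infer_instance

-- ===== CLAIM (what is proved, stated in full; the proofs are below) =====
def Claim_equal_split_achternaam : Prop := ∀ (volledige_achternaam : String), Dom_split_achternaam volledige_achternaam → Spec_split_achternaam volledige_achternaam (split_achternaam volledige_achternaam)

-- ===== LEMMAS AND PROOFS =====
lemma foldA_found (ws : List String) (tv an : List String) :
    ws.foldl stepA (tv, an, true) = (tv, an ++ ws, true) := by
  induction ws generalizing an with
  | nil => simp
  | cons w ws ih => simp [stepA, ih]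

lemma foldA_spec (ws : List String) (tv an : List String) :
    ws.foldl stepA (tv, an, false) =
      match ws.findIdx? startsUpper with
      | none => (tv ++ ws, an, false)
      | some i => (tv ++ ws.take i, an ++ ws.drop i, true) := by
  induction ws generalizing tv with
  | nil => simp
  | cons w ws ih =>
    by_cases h : startsUpper w = true
    · simp [stepA, h, List.findIdx?_cons, foldA_found]
    · simp only [Bool.not_eq_true] at h
      simp only [List.foldl_cons, stepA, h, Bool.and_false, if_neg,
        Bool.false_eq_true, not_false_eq_true]
      rw [ih]
      simp [List.findIdx?_cons, h]
      cases hf : ws.findIdx? startsUpper with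
      | none => simp
      | some i => simp

-- ===== VERDICT (by name: the statement is the Claim_ definition above) =====
theorem split_achternaam_spec : Claim_equal_split_achternaam := by
  intro s _
  unfold Spec_split_achternaam split_achternaam split_achternaam_alt
  by_cases hs : s = ""
  · simp [hs]
  · simp only [hs, ite_false]
    rw [foldA_spec]
    cases hf : (PySem.Str.split₀ s).findIdx? startsUpper with
    | none => simp
    | some i =>
      have hi : i < (PySem.Str.split₀ s).length := by
        have := List.findIdx?_eq_some_iff_findIdx_eq.mp hf
        omega
      have hdrop : (PySem.Str.split₀ s).drop i ≠ [] := by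
        simp [List.drop_eq_nil_iff]; omega
      simp [hdrop]
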